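-- pv_equiv track=rewrite | github.com/corentinlunel/corentinlunel.github.io | Final_entrelacs.py | maxdouble
-- ===== SOURCE A (Python) =====
-- def maxdouble(l) :
--
--     """couple du maximum de chacun des couples de l"""
--
--     c,d = 0,0
--     for i in l :
--         a,b = i
--         if a > c :
--             c = a
--         if b > d :
--             d = b
--     return c,d
-- ===== SOURCE B (Python) =====
-- def maxdouble(l):
--     """couple du maximum de chacun des couples de l"""
--     c = max([0] + [a for a, b in l])
--     d = max([0] + [b for a, b in l])
--     return c, d
-- ===== Notes on version B (the rewrite author's own statement) =====
-- stated objective: idiomatic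
-- what changed: Replaces the fused single loop with mutable (c,d) state by two independent per-coordinate max reductions over a 0-seeded list.
import Mathlib
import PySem

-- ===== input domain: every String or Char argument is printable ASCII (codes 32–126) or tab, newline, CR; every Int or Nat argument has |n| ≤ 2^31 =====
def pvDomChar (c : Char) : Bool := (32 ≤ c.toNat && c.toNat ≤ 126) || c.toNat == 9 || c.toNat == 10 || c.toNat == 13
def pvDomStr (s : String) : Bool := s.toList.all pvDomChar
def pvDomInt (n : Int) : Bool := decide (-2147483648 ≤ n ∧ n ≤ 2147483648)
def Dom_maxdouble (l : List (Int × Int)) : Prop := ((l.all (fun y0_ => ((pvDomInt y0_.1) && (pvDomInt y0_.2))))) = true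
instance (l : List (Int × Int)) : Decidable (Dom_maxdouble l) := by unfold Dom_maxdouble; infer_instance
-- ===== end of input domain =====

-- B replaces A's fused loop over (c,d) with two independent coordinate-wise max reductions (idiomatic).

-- ===== PORT A =====
-- fused loop: for i in l: a,b = i; if a > c: c = a; if b > d: d = b
def maxdouble (l : List (Int × Int)) : Int × Int :=
  l.foldl (fun cd i =>
    let c := if i.1 > cd.1 then i.1 else cd.1
    let d := if i.2 > cd.2 then i.2 else cd.2
    (c, d)) (0, 0)

-- ===== PORT B =====
-- c = max([0] + [a for a,b in l]); d = max([0] + [b for a,b in l])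
def maxdouble_alt (l : List (Int × Int)) : Int × Int :=
  let c := ((0 : Int) :: l.map Prod.fst).foldl max 0
  let d := ((0 : Int) :: l.map Prod.snd).foldl max 0
  (c, d)

-- ===== PRECONDITION & SPEC =====
def Spec_maxdouble (l : List (Int × Int)) (out : Int × Int) : Prop := out = maxdouble_alt l
instance (l : List (Int × Int)) (out : Int × Int) : Decidable (Spec_maxdouble l out) := by unfold Spec_maxdouble; infer_instance

-- ===== CLAIM (what is proved, stated in full; the proofs are below) =====
def Claim_equal_maxdouble : Prop := ∀ (l : List (Int × Int)), Dom_maxdouble l → Spec_maxdouble l (maxdouble l)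

-- ===== LEMMAS AND PROOFS =====
theorem maxdouble_fold_eq (l : List (Int × Int)) (c d : Int) :
    l.foldl (fun cd i =>
      let c := if i.1 > cd.1 then i.1 else cd.1
      let d := if i.2 > cd.2 then i.2 else cd.2
      (c, d)) (c, d)
    = ((l.map Prod.fst).foldl max c, (l.map Prod.snd).foldl max d) := by
  induction l generalizing c d with
  | nil => simp
  | cons h t ih =>
    simp only [List.foldl, List.map]
    rw [ih]
    congr 1 <;> · congr 1; simp only [max_def]; split_ifs <;> omega

-- ===== VERDICT (by name: the statement is the Claim_ definition above) =====
theorem maxdouble_spec : Claim_equal_maxdouble := by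
  intro l _
  unfold Spec_maxdouble maxdouble maxdouble_alt
  simp [maxdouble_fold_eq]
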